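-- pv_equiv track=rewrite | github.com/arianacarnielli/3I025 | TP5-7/teaching-iaro-master/pySpriteWorld-forStudents/DiscreteWorld-coopPathFinding.py | matrice_collisions
-- ===== SOURCE A (Python) =====
-- def liste_collisions_chemins(chemin1, chemin2):
--     liste_collisions = []
--     for x,y in chemin1:
--         if (x,y) in chemin2:
--             liste_collisions.append((x,y))
--     return liste_collisions
--
-- def matrice_collisions(tab_chemins):
--     n = len(tab_chemins)
--     mat = [ [0]*n for i in range (n) ]
--
--     for i in range(n):
--         for j in range(n):
--             if i==j :
--                 mat[i][j] = -1
--                 continue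
--             chemin1 = tab_chemins[i]
--             chemin2 = tab_chemins[j]
--             liste_collisions = liste_collisions_chemins(chemin1, chemin2)
--
--             for x,y in liste_collisions :
--                 mat[i][j] = 1
--     return mat
-- ===== SOURCE B (Python) =====
-- def matrice_collisions(tab_chemins):
--     occ = {}
--     for i, chemin in enumerate(tab_chemins):
--         for cell in chemin:
--             occ.setdefault(cell, set()).add(i)
--     n = len(tab_chemins)
--     mat = []
--     for i, chemin in enumerate(tab_chemins):
--         partners = set()
--         for cell in chemin:
--             partners |= occ[cell]
--         mat.append([-1 if i == j else (1 if j in partners else 0)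
--                     for j in range(n)])
--     return mat
-- ===== Notes on version B (the rewrite author's own statement) =====
-- stated objective: faster
-- what changed: Replaces A's pairwise comparison of every pair of paths (rescanning chemin2 for each cell of chemin1) with an inverted index: one pass builds a dict mapping each cell to the set of path indices containing it, then each row is filled by unioning the index sets of that path's cells into a partner set and testing membership, so no path pair is ever compared directly.
import Mathlib
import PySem

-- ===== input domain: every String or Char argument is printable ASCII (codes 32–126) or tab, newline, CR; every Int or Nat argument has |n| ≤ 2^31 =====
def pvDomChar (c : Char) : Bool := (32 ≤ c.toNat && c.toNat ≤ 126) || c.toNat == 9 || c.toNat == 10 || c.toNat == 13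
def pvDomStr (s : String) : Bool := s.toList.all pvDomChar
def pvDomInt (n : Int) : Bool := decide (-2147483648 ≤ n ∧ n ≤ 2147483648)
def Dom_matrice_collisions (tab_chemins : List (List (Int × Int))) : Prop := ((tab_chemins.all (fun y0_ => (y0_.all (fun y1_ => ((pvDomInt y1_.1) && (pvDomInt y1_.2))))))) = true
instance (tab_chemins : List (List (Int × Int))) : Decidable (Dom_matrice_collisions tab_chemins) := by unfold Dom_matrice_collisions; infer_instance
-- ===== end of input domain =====

-- B replaces A's pairwise path comparison with an inverted index (cell -> set of path indices)
-- built in one pass; each row is then filled from the union of its cells' index sets (objective: faster).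


-- ===== PORT A =====
def liste_collisions_chemins (chemin1 chemin2 : List (Int × Int)) : List (Int × Int) :=
  chemin1.foldl (fun acc p => if chemin2.contains p then acc ++ [p] else acc) []

def matrice_collisions (tab_chemins : List (List (Int × Int))) : List (List Int) :=
  let n := tab_chemins.length
  let mat := (List.range n).map (fun _ => List.replicate n (0 : Int))
  (List.range n).foldl (fun mat i =>
    (List.range n).foldl (fun mat j =>
      if i = j then mat.modify i (fun row => row.set j (-1))
      else
        let chemin1 := tab_chemins.getD i []
        let chemin2 := tab_chemins.getD j []
        let liste_collisions := liste_collisions_chemins chemin1 chemin2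
        liste_collisions.foldl (fun mat _ => mat.modify i (fun row => row.set j 1)) mat)
      mat)
    mat

-- ===== PORT B =====
-- 'occ.setdefault(cell, set()).add(i)' = overwrite occ[cell] with its old value (default empty set) plus i
def matrice_collisions_alt (tab_chemins : List (List (Int × Int))) : List (List Int) :=
  let occ := (PySem.List.enumerate tab_chemins).foldl
      (fun occ ic => ic.2.foldl
        (fun occ cell => occ.insert cell ((occ.getD cell (PySem.Set.ofList [])).add ic.1)) occ)
      PySem.Dict.empty
  let n := tab_chemins.length
  (PySem.List.enumerate tab_chemins).foldl
    (fun mat ic =>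
      let partners := ic.2.foldl
        (fun s cell => s.union (occ.getD cell (PySem.Set.ofList []))) (PySem.Set.ofList [])
      mat ++ [(List.range n).map (fun (j : Nat) =>
        if ic.1 = (j : Int) then (-1 : Int)
        else if partners.contains (j : Int) then 1 else 0)])
    []

-- ===== PRECONDITION & SPEC =====
def Spec_matrice_collisions (tab_chemins : List (List (Int × Int))) (out : List (List Int)) : Prop := out = matrice_collisions_alt tab_chemins
instance (tab_chemins : List (List (Int × Int))) (out : List (List Int)) : Decidable (Spec_matrice_collisions tab_chemins out) := by unfold Spec_matrice_collisions; infer_instance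

-- ===== CLAIM (what is proved, stated in full; the proofs are below) =====
def Claim_equal_matrice_collisions : Prop := ∀ (tab_chemins : List (List (Int × Int))), Dom_matrice_collisions tab_chemins → Spec_matrice_collisions tab_chemins (matrice_collisions tab_chemins)

-- ===== LEMMAS AND PROOFS =====

-- the common entrywise description both ports are reduced to:
-- entry (i,j) is -1 on the diagonal, 1 iff paths i and j share a cell, 0 otherwise
def specEntry (tab : List (List (Int × Int))) (i j : Nat) : Int :=
  if i = j then -1
  else if (tab.getD i []).any (fun p => (tab.getD j []).contains p) then 1 else 0

def specMat (tab : List (List (Int × Int))) : List (List Int) :=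
  (List.range tab.length).map (fun i => (List.range tab.length).map (fun j => specEntry tab i j))

def specRow (tab : List (List (Int × Int))) (i : Nat) : List Int :=
  (List.range tab.length).map (fun j => specEntry tab i j)

def aInner (tab : List (List (Int × Int))) (i : Nat) (mat : List (List Int)) (j : Nat) :
    List (List Int) :=
  if i = j then mat.modify i (fun row => row.set j (-1))
  else
    let chemin1 := tab.getD i []
    let chemin2 := tab.getD j []
    let liste_collisions := liste_collisions_chemins chemin1 chemin2
    liste_collisions.foldl (fun mat _ => mat.modify i (fun row => row.set j 1)) mat

def rowUpd (tab : List (List (Int × Int))) (i j : Nat) (row : List Int) : List Int :=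
  if specEntry tab i j = 0 then row else row.set j (specEntry tab i j)

def rowTrans (tab : List (List (Int × Int))) (i : Nat) (row : List Int) : List Int :=
  (List.range tab.length).foldl (fun row j => rowUpd tab i j row) row

theorem a_eq_fold (tab : List (List (Int × Int))) :
    matrice_collisions tab =
      (List.range tab.length).foldl
        (fun mat i => (List.range tab.length).foldl (aInner tab i) mat)
        ((List.range tab.length).map (fun _ => List.replicate tab.length (0 : Int))) := rfl

theorem lc_eq_filter (c1 c2 : List (Int × Int)) :
    liste_collisions_chemins c1 c2 = c1.filter (fun p => c2.contains p) := by
  unfold liste_collisions_chemins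
  suffices h : ∀ (l : List (Int × Int)) (acc : List (Int × Int)),
      l.foldl (fun acc p => if c2.contains p then acc ++ [p] else acc) acc
        = acc ++ l.filter (fun p => c2.contains p) by
    simpa using h c1 []
  intro l
  induction l with
  | nil => simp
  | cons a l ih =>
    intro acc
    simp only [List.foldl_cons, List.filter_cons]
    split
    · rw [ih]; simp
    · rw [ih]

theorem fold_const (lc : List (Int × Int)) (m : List (List Int)) (i j : Nat) :
    lc.foldl (fun mat _ => mat.modify i (fun row => row.set j (1 : Int))) m
      = if lc.isEmpty then m else m.modify i (fun row => row.set j 1) := by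
  induction lc generalizing m with
  | nil => simp
  | cons a l ih =>
    simp only [List.foldl_cons, List.isEmpty_cons, Bool.false_eq_true, if_false]
    rw [ih]
    split
    · rfl
    · rw [List.modify_modify_eq]
      congr 1
      funext row
      simp [Function.comp, List.set_set]

theorem aInner_getElem? (tab : List (List (Int × Int))) (i j : Nat) (mat : List (List Int))
    (r : Nat) :
    (aInner tab i mat j)[r]? =
      if r = i then mat[r]?.map (rowUpd tab i j) else mat[r]? := by
  unfold aInner
  by_cases hij : i = j
  · subst hij
    rw [if_pos rfl, List.getElem?_modify]
    have hs : specEntry tab i i = -1 := by simp [specEntry]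
    by_cases hri : r = i
    · subst hri
      cases mat[r]? <;> simp [rowUpd, hs]
    · cases h : mat[r]? <;> simp [hri, h] <;> exact fun h' => absurd h'.symm hri
  · rw [if_neg hij]
    simp only [lc_eq_filter]
    rw [fold_const]
    have hspec : specEntry tab i j
        = if (tab.getD i []).any (fun p => (tab.getD j []).contains p) then 1 else 0 := by
      simp [specEntry, hij]
    cases hany : (tab.getD i []).any (fun p => (tab.getD j []).contains p)
    · have hnil : (tab.getD i []).filter (fun p => (tab.getD j []).contains p) = [] := by
        rw [List.filter_eq_nil_iff]
        intro a ha hpa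
        have := List.any_eq_true.mpr ⟨a, ha, hpa⟩
        rw [hany] at this; cases this
      have hemp : ((tab.getD i []).filter (fun p => (tab.getD j []).contains p)).isEmpty = true := by
        rw [hnil]; rfl
      rw [hemp]
      have h0 : specEntry tab i j = 0 := by rw [hspec, hany]; rfl
      simp only [if_true]
      by_cases hri : r = i <;> cases h : mat[r]? <;> simp [hri, rowUpd, h0, h]
    · have hne : ((tab.getD i []).filter (fun p => (tab.getD j []).contains p)).isEmpty = false := by
        rcases List.any_eq_true.mp hany with ⟨a, ha, hpa⟩
        rw [List.isEmpty_eq_false_iff]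
        intro hnil2
        rw [List.filter_eq_nil_iff] at hnil2
        exact hnil2 a ha hpa
      rw [hne]
      have h1 : specEntry tab i j = 1 := by rw [hspec, hany]; rfl
      simp only [Bool.false_eq_true, if_false]
      rw [List.getElem?_modify]
      by_cases hri : r = i
      · subst hri
        cases mat[r]? <;> simp [rowUpd, h1]
      · cases h : mat[r]? <;> simp [hri, h] <;> exact fun h' => absurd h'.symm hri

theorem inner_fold? (tab : List (List (Int × Int))) (i : Nat) (js : List Nat) :
    ∀ (mat : List (List Int)) (r : Nat),
      (js.foldl (aInner tab i) mat)[r]? =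
        if r = i then mat[r]?.map (fun row => js.foldl (fun row j => rowUpd tab i j row) row)
        else mat[r]? := by
  induction js with
  | nil =>
    intro mat r
    by_cases hri : r = i
    · subst hri; cases h : mat[r]? <;> simp [h]
    · simp [hri]
  | cons j js ih =>
    intro mat r
    rw [List.foldl_cons, ih, aInner_getElem?]
    by_cases hri : r = i
    · subst hri
      cases h : mat[r]? <;> simp [h]
    · simp [hri]

theorem rowFold_getElem? (tab : List (List (Int × Int))) (i : Nat) (js : List Nat) :
    ∀ (row : List Int) (c : Nat),
      (js.foldl (fun row j => rowUpd tab i j row) row)[c]? =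
        if c ∈ js ∧ specEntry tab i c ≠ 0 ∧ c < row.length then some (specEntry tab i c)
        else row[c]? := by
  induction js with
  | nil => intro row c; simp
  | cons j js ih =>
    intro row c
    rw [List.foldl_cons, ih]
    have hlen : (rowUpd tab i j row).length = row.length := by
      unfold rowUpd; split <;> simp
    rw [hlen]
    by_cases hcj : c = j
    · subst hcj
      by_cases hs : specEntry tab i c = 0
      · simp [rowUpd, hs]
      · by_cases hlt : c < row.length
        · simp [rowUpd, hs, hlt, List.getElem?_set]
        · have hnone : row[c]? = none := List.getElem?_eq_none (by omega)
          simp [rowUpd, hs, hlt, List.getElem?_set, hnone]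
    · have hset : ∀ v : Int, (row.set j v)[c]? = row[c]? :=
        fun v => List.getElem?_set_ne (fun h => hcj h.symm)
      by_cases hsj : specEntry tab i j = 0 <;>
        simp [rowUpd, hsj, hset, hcj]

theorem outer_fold? (tab : List (List (Int × Int))) :
    ∀ (is : List Nat), is.Nodup → ∀ (mat : List (List Int)) (r : Nat),
      (is.foldl (fun mat i => (List.range tab.length).foldl (aInner tab i) mat) mat)[r]? =
        if r ∈ is then mat[r]?.map (rowTrans tab r) else mat[r]? := by
  intro is
  induction is with
  | nil => intro _ mat r; simp
  | cons i is ih =>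
    intro hnd mat r
    rw [List.nodup_cons] at hnd
    rw [List.foldl_cons, ih hnd.2, inner_fold?]
    by_cases hmem : r ∈ is
    · have hri : r ≠ i := fun h => hnd.1 (h ▸ hmem)
      simp [hmem, hri, rowTrans]
    · by_cases hri : r = i
      · subst hri
        cases h : mat[r]? <;> simp [hmem, h, rowTrans]
      · simp [hmem, hri]

theorem a_eq_spec (tab : List (List (Int × Int))) :
    matrice_collisions tab = specMat tab := by
  rw [a_eq_fold]
  apply List.ext_getElem?
  intro r
  rw [outer_fold? tab (List.range tab.length) List.nodup_range]
  by_cases hr : r < tab.length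
  · have hmem : r ∈ List.range tab.length := List.mem_range.mpr hr
    rw [if_pos hmem]
    have h0 : ((List.range tab.length).map
        (fun _ => List.replicate tab.length (0 : Int)))[r]? = some (List.replicate tab.length 0) := by
      simp [List.getElem?_map, List.getElem?_range, hr]
    rw [h0]
    have hspec : (specMat tab)[r]? = some (specRow tab r) := by
      simp [specMat, specRow, List.getElem?_map, List.getElem?_range, hr]
    rw [hspec]
    simp only [Option.map_some, Option.some.injEq]
    apply List.ext_getElem?
    intro c
    rw [rowTrans, rowFold_getElem?]
    by_cases hc : c < tab.length
    · have hcm : c ∈ List.range tab.length := List.mem_range.mpr hc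
      have hrow : (specRow tab r)[c]? = some (specEntry tab r c) := by
        simp [specRow, List.getElem?_map, List.getElem?_range, hc]
      rw [hrow]
      by_cases hs : specEntry tab r c = 0
      · simp [hcm, hs, List.getElem?_replicate, hc]
      · simp [hcm, hs, List.length_replicate, hc]
    · have h1 : (List.replicate tab.length (0 : Int))[c]? = none := by
        simp [List.getElem?_replicate]; omega
      have h2 : (specRow tab r)[c]? = none := by
        apply List.getElem?_eq_none
        simp [specRow]; omega
      have hcm : c ∉ List.range tab.length := by simp [List.mem_range]; omega
      simp [hcm, h1, h2, List.length_replicate]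
  · have hmem : r ∉ List.range tab.length := by simp [List.mem_range]; omega
    rw [if_neg hmem]
    have h1 : ((List.range tab.length).map
        (fun _ => List.replicate tab.length (0 : Int)))[r]? = none := by
      apply List.getElem?_eq_none; simp; omega
    have h2 : (specMat tab)[r]? = none := by
      apply List.getElem?_eq_none; simp [specMat]; omega
    rw [h1, h2]

-- ===== B-side lemmas =====

-- one path's cells folded into the dict: the group of c gains idx exactly when c occurs in the path
theorem dict_inner_mem (idx : Int) (cells : List (Int × Int)) :
    ∀ (occ : PySem.Dict (Int × Int) (PySem.Set Int)) (c : Int × Int) (i : Int),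
      i ∈ ((cells.foldl
          (fun occ cell => occ.insert cell ((occ.getD cell (PySem.Set.ofList [])).add idx)) occ
        ).getD c (PySem.Set.ofList []))
        ↔ i ∈ occ.getD c (PySem.Set.ofList []) ∨ (i = idx ∧ c ∈ cells) := by
  induction cells with
  | nil => intro occ c i; simp
  | cons a cells ih =>
    intro occ c i
    rw [List.foldl_cons, ih]
    rw [PySem.Dict.getD_insert]
    by_cases hca : c = a
    · subst hca
      rw [if_pos rfl, PySem.Set.mem_add]
      simp only [List.mem_cons]
      tauto
    · rw [if_neg hca]
      simp only [List.mem_cons]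
      tauto

theorem dict_outer_mem (L : List (Int × List (Int × Int))) :
    ∀ (occ : PySem.Dict (Int × Int) (PySem.Set Int)) (c : Int × Int) (i : Int),
      i ∈ ((L.foldl
          (fun occ ic => ic.2.foldl
            (fun occ cell => occ.insert cell ((occ.getD cell (PySem.Set.ofList [])).add ic.1)) occ)
          occ).getD c (PySem.Set.ofList []))
        ↔ i ∈ occ.getD c (PySem.Set.ofList []) ∨ ∃ p ∈ L, i = p.1 ∧ c ∈ p.2 := by
  induction L with
  | nil => intro occ c i; simp
  | cons p L ih =>
    intro occ c i
    rw [List.foldl_cons, ih, dict_inner_mem]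
    simp only [List.mem_cons]
    constructor
    · rintro (⟨h | h⟩ | ⟨q, hq, h⟩)
      · exact Or.inl h
      · exact Or.inr ⟨p, Or.inl rfl, h⟩
      · exact Or.inr ⟨q, Or.inr hq, h⟩
    · rintro (h | ⟨q, (rfl | hq), h⟩)
      · exact Or.inl (Or.inl h)
      · exact Or.inl (Or.inr h)
      · exact Or.inr ⟨q, hq, h⟩

theorem mem_enumerate_iff (tab : List (List (Int × Int))) (p : Int × List (Int × Int)) :
    p ∈ PySem.List.enumerate tab 0 ↔ ∃ k, ∃ h : k < tab.length, p = ((k : Int), tab[k]) := by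
  rw [List.mem_iff_getElem]
  constructor
  · rintro ⟨k, hk, rfl⟩
    rw [PySem.List.getElem_enumerate]
    have hk' : k < tab.length := by rwa [PySem.List.length_enumerate] at hk
    exact ⟨k, hk', by simp⟩
  · rintro ⟨k, hk, rfl⟩
    refine ⟨k, by rwa [PySem.List.length_enumerate], ?_⟩
    rw [PySem.List.getElem_enumerate]
    simp

-- final inverted index: i is in the group of c iff i is the index of a path containing c
theorem occ_mem (tab : List (List (Int × Int))) (c : Int × Int) (i : Int) :
    i ∈ (((PySem.List.enumerate tab 0).foldl
        (fun occ ic => ic.2.foldl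
          (fun occ cell => occ.insert cell ((occ.getD cell (PySem.Set.ofList [])).add ic.1)) occ)
        PySem.Dict.empty).getD c (PySem.Set.ofList []))
      ↔ ∃ k, ∃ h : k < tab.length, i = (k : Int) ∧ c ∈ tab[k] := by
  rw [dict_outer_mem, PySem.Dict.getD_empty]
  simp only [PySem.Set.mem_ofList, List.not_mem_nil, false_or]
  constructor
  · rintro ⟨p, hp, hi, hc⟩
    rcases (mem_enumerate_iff tab p).mp hp with ⟨k, hk, rfl⟩
    exact ⟨k, hk, hi, hc⟩
  · rintro ⟨k, hk, hi, hc⟩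
    exact ⟨((k : Int), tab[k]), (mem_enumerate_iff tab _).mpr ⟨k, hk, rfl⟩, hi, hc⟩

theorem partners_mem (occ : PySem.Dict (Int × Int) (PySem.Set Int)) (cells : List (Int × Int)) :
    ∀ (s0 : PySem.Set Int) (j : Int),
      j ∈ cells.foldl (fun s cell => s.union (occ.getD cell (PySem.Set.ofList []))) s0
        ↔ j ∈ s0 ∨ ∃ c ∈ cells, j ∈ occ.getD c (PySem.Set.ofList []) := by
  induction cells with
  | nil => intro s0 j; simp
  | cons a cells ih =>
    intro s0 j
    rw [List.foldl_cons, ih, PySem.Set.mem_union]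
    simp only [List.mem_cons]
    constructor
    · rintro (⟨h | h⟩ | ⟨c, hc, h⟩)
      · exact Or.inl h
      · exact Or.inr ⟨a, Or.inl rfl, h⟩
      · exact Or.inr ⟨c, Or.inr hc, h⟩
    · rintro (h | ⟨c, (rfl | hc), h⟩)
      · exact Or.inl (Or.inl h)
      · exact Or.inl (Or.inr h)
      · exact Or.inr ⟨c, hc, h⟩

theorem foldl_append_map {α β : Type} (L : List α) (f : α → β) :
    ∀ (acc : List β), L.foldl (fun acc x => acc ++ [f x]) acc = acc ++ L.map f := by
  induction L with
  | nil => intro acc; simp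
  | cons a L ih => intro acc; rw [List.foldl_cons, ih]; simp

theorem alt_eq_spec (tab : List (List (Int × Int))) :
    matrice_collisions_alt tab = specMat tab := by
  unfold matrice_collisions_alt
  rw [foldl_append_map]
  rw [List.nil_append]
  apply List.ext_getElem
  · simp [PySem.List.length_enumerate, specMat]
  intro i h1 h2
  rw [List.getElem_map, PySem.List.getElem_enumerate]
  have hi : i < tab.length := by simpa [PySem.List.length_enumerate] using h1
  have hspec : (specMat tab)[i] = (List.range tab.length).map (fun j => specEntry tab i j) := by
    simp [specMat, List.getElem_range]
  rw [hspec]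
  apply List.ext_getElem
  · simp
  intro j hj1 hj2
  have hj : j < tab.length := by simpa using hj2
  simp only [List.getElem_map, List.getElem_range]
  unfold specEntry
  rw [List.getD_eq_getElem _ _ hi, List.getD_eq_getElem _ _ hj]
  by_cases hij : i = j
  · subst hij
    simp
  · have hcast : ¬ ((0 : Int) + (i : Int) = (j : Int)) := by
      simpa using fun h => hij (Nat.cast_injective h)
    rw [if_neg hcast, if_neg hij]
    have hpart : ((tab[i].foldl
        (fun s cell => s.union ((((PySem.List.enumerate tab 0).foldl
          (fun occ ic => ic.2.foldl
            (fun occ cell => occ.insert cell ((occ.getD cell (PySem.Set.ofList [])).add ic.1)) occ)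
          PySem.Dict.empty)).getD cell (PySem.Set.ofList [])))
        (PySem.Set.ofList [])).contains (j : Int)) = true
        ↔ ∃ c ∈ tab[i], c ∈ tab[j] := by
      rw [PySem.Set.contains_iff, partners_mem]
      simp only [PySem.Set.mem_ofList, List.not_mem_nil, false_or]
      constructor
      · rintro ⟨c, hc, hmem⟩
        rcases (occ_mem tab c (j : Int)).mp hmem with ⟨k, hk, hjk, hck⟩
        have : k = j := by exact_mod_cast hjk.symm
        subst this
        exact ⟨c, hc, hck⟩
      · rintro ⟨c, hc, hcj⟩
        exact ⟨c, hc, (occ_mem tab c (j : Int)).mpr ⟨j, hj, rfl, hcj⟩⟩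
    cases hany : (tab[i].any fun p => tab[j].contains p)
    · have : ¬ ∃ c ∈ tab[i], c ∈ tab[j] := by
        intro ⟨c, hc, hcj⟩
        have := List.any_eq_true.mpr ⟨c, hc, List.contains_iff_mem.mpr hcj⟩
        rw [hany] at this; cases this
      have hcont := (not_iff_not.mpr hpart).mpr this
      simp only [Bool.not_eq_true] at hcont
      rw [hcont]
    · rcases List.any_eq_true.mp hany with ⟨c, hc, hcj⟩
      have hcont := hpart.mpr ⟨c, hc, List.contains_iff_mem.mp hcj⟩
      rw [hcont]

-- ===== VERDICT (by name: the statement is the Claim_ definition above) =====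
theorem matrice_collisions_spec : Claim_equal_matrice_collisions := by
  intro tab _
  unfold Spec_matrice_collisions
  rw [a_eq_spec, alt_eq_spec]
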